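-- pv_equiv track=rewrite | github.com/jakhonma/smm-monitoring | apps/analytic/services.py | kpi_percent
-- ===== SOURCE A (Python) =====
-- def kpi_percent(score: int) -> str:
--     ranges = (
--         ((95, 100), 100),
--         ((89, 94), 90),
--         ((84, 88), 80),
--         ((78, 83), 70),
--         ((72, 77), 60),
--         ((66, 71), 50),
--         ((60, 65), 40),
--         ((54, 59), 30),
--         ((48, 53), 20),
--         ((42, 47), 10),
--     )
--     for (low, high), percent in ranges:
--         if low <= score <= high:
--             return percent
--     return 0  # agar past bo'lsa
-- ===== SOURCE B (Python) =====
-- import bisect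
--
-- _THRESHOLDS = [42, 48, 54, 60, 66, 72, 78, 84, 89, 95]
-- _PERCENTS = [0, 10, 20, 30, 40, 50, 60, 70, 80, 90, 100]
--
-- def kpi_percent(score: int) -> int:
--     if score < 42 or score > 100:
--         return 0
--     return _PERCENTS[bisect.bisect_right(_THRESHOLDS, score)]
-- ===== Notes on version B (the rewrite author's own statement) =====
-- stated objective: idiomatic
-- what changed: Replaced the linear scan over per-bucket (low, high) range pairs by a range guard plus bisect.bisect_right on an ascending threshold table indexing a parallel percents list.
import Mathlib
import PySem

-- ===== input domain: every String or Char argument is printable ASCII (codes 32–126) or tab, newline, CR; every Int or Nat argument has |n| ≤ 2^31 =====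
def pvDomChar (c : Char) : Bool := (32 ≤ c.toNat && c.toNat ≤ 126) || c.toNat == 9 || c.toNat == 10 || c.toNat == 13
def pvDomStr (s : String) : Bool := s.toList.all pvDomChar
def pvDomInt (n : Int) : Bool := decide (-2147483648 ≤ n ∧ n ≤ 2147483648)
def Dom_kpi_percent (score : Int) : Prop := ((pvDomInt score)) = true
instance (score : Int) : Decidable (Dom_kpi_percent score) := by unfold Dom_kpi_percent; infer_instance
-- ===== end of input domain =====

-- B replaces A's linear scan over (range, percent) pairs by a guard plus a
-- binary search (bisect_right) over an ascending threshold table (idiomatic).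

-- ===== PORT A =====
-- the tuple of ((low, high), percent) ranges, in A's order
def kpiRanges : List ((Int × Int) × Int) :=
  [((95, 100), 100), ((89, 94), 90), ((84, 88), 80), ((78, 83), 70),
   ((72, 77), 60), ((66, 71), 50), ((60, 65), 40), ((54, 59), 30),
   ((48, 53), 20), ((42, 47), 10)]

-- the for-loop with early return, as structural recursion over the list
def kpiLoop (score : Int) : List ((Int × Int) × Int) → Int
  | [] => 0
  | ((low, high), percent) :: rest =>
    if low ≤ score ∧ score ≤ high then percent else kpiLoop score rest

def kpi_percent (score : Int) : Int := kpiLoop score kpiRanges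

-- ===== PORT B =====
def kpiThresholds : List Int := [42, 48, 54, 60, 66, 72, 78, 84, 89, 95]
def kpiPercents : List Int := [0, 10, 20, 30, 40, 50, 60, 70, 80, 90, 100]

-- bisect.bisect_right, ported as the corresponding library expression on a
-- sorted list: the number of leading elements ≤ x
def bisectRight (xs : List Int) (x : Int) : Nat :=
  (xs.takeWhile (fun t => decide (t ≤ x))).length

def kpi_percent_alt (score : Int) : Int :=
  if score < 42 ∨ 100 < score then 0
  else kpiPercents.getD (bisectRight kpiThresholds score) 0

-- ===== PRECONDITION & SPEC =====
def Spec_kpi_percent (score : Int) (out : Int) : Prop := out = kpi_percent_alt score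
instance (score : Int) (out : Int) : Decidable (Spec_kpi_percent score out) := by unfold Spec_kpi_percent; infer_instance

-- ===== CLAIM (what is proved, stated in full; the proofs are below) =====
def Claim_equal_kpi_percent : Prop := ∀ (score : Int), Dom_kpi_percent score → Spec_kpi_percent score (kpi_percent score)

-- ===== LEMMAS AND PROOFS =====

lemma kpiBoth_low (score : Int) (h1 : score ≤ 41)  :
    kpi_percent score = kpi_percent_alt score := by
  have hA : kpi_percent score = (0 : Int) := by
    simp only [kpi_percent, kpiRanges, kpiLoop,
      show ¬ (95 : Int) ≤ score by omega,
      show ¬ (89 : Int) ≤ score by omega,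
      show ¬ (84 : Int) ≤ score by omega,
      show ¬ (78 : Int) ≤ score by omega,
      show ¬ (72 : Int) ≤ score by omega,
      show ¬ (66 : Int) ≤ score by omega,
      show ¬ (60 : Int) ≤ score by omega,
      show ¬ (54 : Int) ≤ score by omega,
      show ¬ (48 : Int) ≤ score by omega,
      show ¬ (42 : Int) ≤ score by omega,
      false_and, if_false]
  have hB : kpi_percent_alt score = (0 : Int) := by
    rw [kpi_percent_alt, if_pos (by omega : score < 42 ∨ 100 < score)]
  rw [hA, hB]

lemma kpiBoth_high (score : Int) (h1 : 101 ≤ score)  :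
    kpi_percent score = kpi_percent_alt score := by
  have hA : kpi_percent score = (0 : Int) := by
    simp only [kpi_percent, kpiRanges, kpiLoop,
      show (95 : Int) ≤ score by omega,
      show (89 : Int) ≤ score by omega,
      show (84 : Int) ≤ score by omega,
      show (78 : Int) ≤ score by omega,
      show (72 : Int) ≤ score by omega,
      show (66 : Int) ≤ score by omega,
      show (60 : Int) ≤ score by omega,
      show (54 : Int) ≤ score by omega,
      show (48 : Int) ≤ score by omega,
      show (42 : Int) ≤ score by omega,
      show ¬ score ≤ 100 by omega,
      show ¬ score ≤ 94 by omega,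
      show ¬ score ≤ 88 by omega,
      show ¬ score ≤ 83 by omega,
      show ¬ score ≤ 77 by omega,
      show ¬ score ≤ 71 by omega,
      show ¬ score ≤ 65 by omega,
      show ¬ score ≤ 59 by omega,
      show ¬ score ≤ 53 by omega,
      show ¬ score ≤ 47 by omega,
      and_false, if_false]
  have hB : kpi_percent_alt score = (0 : Int) := by
    rw [kpi_percent_alt, if_pos (by omega : score < 42 ∨ 100 < score)]
  rw [hA, hB]

lemma kpiBoth_42 (score : Int) (h1 : (42 : Int) ≤ score) (h2 : score ≤ 47) :
    kpi_percent score = kpi_percent_alt score := by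
  have hA : kpi_percent score = (10 : Int) := by
    simp only [kpi_percent, kpiRanges, kpiLoop,
      show ¬ (95 : Int) ≤ score by omega,
      show ¬ (89 : Int) ≤ score by omega,
      show ¬ (84 : Int) ≤ score by omega,
      show ¬ (78 : Int) ≤ score by omega,
      show ¬ (72 : Int) ≤ score by omega,
      show ¬ (66 : Int) ≤ score by omega,
      show ¬ (60 : Int) ≤ score by omega,
      show ¬ (54 : Int) ≤ score by omega,
      show ¬ (48 : Int) ≤ score by omega,
      show (42 : Int) ≤ score by omega,
      show score ≤ 47 by omega,
      false_and, and_true, if_false, if_true]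
  have hB : kpi_percent_alt score = (10 : Int) := by
    rw [kpi_percent_alt, if_neg (by omega : ¬ (score < 42 ∨ 100 < score))]
    simp only [bisectRight, kpiThresholds, kpiPercents, List.takeWhile_cons, List.takeWhile_nil,
      show (42 : Int) ≤ score by omega,
      show ¬ (48 : Int) ≤ score by omega,
      decide_true, decide_false, Bool.false_eq_true, if_true, if_false]
    rfl
  rw [hA, hB]

lemma kpiBoth_48 (score : Int) (h1 : (48 : Int) ≤ score) (h2 : score ≤ 53) :
    kpi_percent score = kpi_percent_alt score := by
  have hA : kpi_percent score = (20 : Int) := by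
    simp only [kpi_percent, kpiRanges, kpiLoop,
      show ¬ (95 : Int) ≤ score by omega,
      show ¬ (89 : Int) ≤ score by omega,
      show ¬ (84 : Int) ≤ score by omega,
      show ¬ (78 : Int) ≤ score by omega,
      show ¬ (72 : Int) ≤ score by omega,
      show ¬ (66 : Int) ≤ score by omega,
      show ¬ (60 : Int) ≤ score by omega,
      show ¬ (54 : Int) ≤ score by omega,
      show (48 : Int) ≤ score by omega,
      show score ≤ 53 by omega,
      false_and, and_true, if_false, if_true]
  have hB : kpi_percent_alt score = (20 : Int) := by
    rw [kpi_percent_alt, if_neg (by omega : ¬ (score < 42 ∨ 100 < score))]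
    simp only [bisectRight, kpiThresholds, kpiPercents, List.takeWhile_cons, List.takeWhile_nil,
      show (42 : Int) ≤ score by omega,
      show (48 : Int) ≤ score by omega,
      show ¬ (54 : Int) ≤ score by omega,
      decide_true, decide_false, Bool.false_eq_true, if_true, if_false]
    rfl
  rw [hA, hB]

lemma kpiBoth_54 (score : Int) (h1 : (54 : Int) ≤ score) (h2 : score ≤ 59) :
    kpi_percent score = kpi_percent_alt score := by
  have hA : kpi_percent score = (30 : Int) := by
    simp only [kpi_percent, kpiRanges, kpiLoop,
      show ¬ (95 : Int) ≤ score by omega,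
      show ¬ (89 : Int) ≤ score by omega,
      show ¬ (84 : Int) ≤ score by omega,
      show ¬ (78 : Int) ≤ score by omega,
      show ¬ (72 : Int) ≤ score by omega,
      show ¬ (66 : Int) ≤ score by omega,
      show ¬ (60 : Int) ≤ score by omega,
      show (54 : Int) ≤ score by omega,
      show score ≤ 59 by omega,
      false_and, and_true, if_false, if_true]
  have hB : kpi_percent_alt score = (30 : Int) := by
    rw [kpi_percent_alt, if_neg (by omega : ¬ (score < 42 ∨ 100 < score))]
    simp only [bisectRight, kpiThresholds, kpiPercents, List.takeWhile_cons, List.takeWhile_nil,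
      show (42 : Int) ≤ score by omega,
      show (48 : Int) ≤ score by omega,
      show (54 : Int) ≤ score by omega,
      show ¬ (60 : Int) ≤ score by omega,
      decide_true, decide_false, Bool.false_eq_true, if_true, if_false]
    rfl
  rw [hA, hB]

lemma kpiBoth_60 (score : Int) (h1 : (60 : Int) ≤ score) (h2 : score ≤ 65) :
    kpi_percent score = kpi_percent_alt score := by
  have hA : kpi_percent score = (40 : Int) := by
    simp only [kpi_percent, kpiRanges, kpiLoop,
      show ¬ (95 : Int) ≤ score by omega,
      show ¬ (89 : Int) ≤ score by omega,
      show ¬ (84 : Int) ≤ score by omega,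
      show ¬ (78 : Int) ≤ score by omega,
      show ¬ (72 : Int) ≤ score by omega,
      show ¬ (66 : Int) ≤ score by omega,
      show (60 : Int) ≤ score by omega,
      show score ≤ 65 by omega,
      false_and, and_true, if_false, if_true]
  have hB : kpi_percent_alt score = (40 : Int) := by
    rw [kpi_percent_alt, if_neg (by omega : ¬ (score < 42 ∨ 100 < score))]
    simp only [bisectRight, kpiThresholds, kpiPercents, List.takeWhile_cons, List.takeWhile_nil,
      show (42 : Int) ≤ score by omega,
      show (48 : Int) ≤ score by omega,
      show (54 : Int) ≤ score by omega,
      show (60 : Int) ≤ score by omega,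
      show ¬ (66 : Int) ≤ score by omega,
      decide_true, decide_false, Bool.false_eq_true, if_true, if_false]
    rfl
  rw [hA, hB]

lemma kpiBoth_66 (score : Int) (h1 : (66 : Int) ≤ score) (h2 : score ≤ 71) :
    kpi_percent score = kpi_percent_alt score := by
  have hA : kpi_percent score = (50 : Int) := by
    simp only [kpi_percent, kpiRanges, kpiLoop,
      show ¬ (95 : Int) ≤ score by omega,
      show ¬ (89 : Int) ≤ score by omega,
      show ¬ (84 : Int) ≤ score by omega,
      show ¬ (78 : Int) ≤ score by omega,
      show ¬ (72 : Int) ≤ score by omega,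
      show (66 : Int) ≤ score by omega,
      show score ≤ 71 by omega,
      false_and, and_true, if_false, if_true]
  have hB : kpi_percent_alt score = (50 : Int) := by
    rw [kpi_percent_alt, if_neg (by omega : ¬ (score < 42 ∨ 100 < score))]
    simp only [bisectRight, kpiThresholds, kpiPercents, List.takeWhile_cons, List.takeWhile_nil,
      show (42 : Int) ≤ score by omega,
      show (48 : Int) ≤ score by omega,
      show (54 : Int) ≤ score by omega,
      show (60 : Int) ≤ score by omega,
      show (66 : Int) ≤ score by omega,
      show ¬ (72 : Int) ≤ score by omega,
      decide_true, decide_false, Bool.false_eq_true, if_true, if_false]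
    rfl
  rw [hA, hB]

lemma kpiBoth_72 (score : Int) (h1 : (72 : Int) ≤ score) (h2 : score ≤ 77) :
    kpi_percent score = kpi_percent_alt score := by
  have hA : kpi_percent score = (60 : Int) := by
    simp only [kpi_percent, kpiRanges, kpiLoop,
      show ¬ (95 : Int) ≤ score by omega,
      show ¬ (89 : Int) ≤ score by omega,
      show ¬ (84 : Int) ≤ score by omega,
      show ¬ (78 : Int) ≤ score by omega,
      show (72 : Int) ≤ score by omega,
      show score ≤ 77 by omega,
      false_and, and_true, if_false, if_true]
  have hB : kpi_percent_alt score = (60 : Int) := by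
    rw [kpi_percent_alt, if_neg (by omega : ¬ (score < 42 ∨ 100 < score))]
    simp only [bisectRight, kpiThresholds, kpiPercents, List.takeWhile_cons, List.takeWhile_nil,
      show (42 : Int) ≤ score by omega,
      show (48 : Int) ≤ score by omega,
      show (54 : Int) ≤ score by omega,
      show (60 : Int) ≤ score by omega,
      show (66 : Int) ≤ score by omega,
      show (72 : Int) ≤ score by omega,
      show ¬ (78 : Int) ≤ score by omega,
      decide_true, decide_false, Bool.false_eq_true, if_true, if_false]
    rfl
  rw [hA, hB]

lemma kpiBoth_78 (score : Int) (h1 : (78 : Int) ≤ score) (h2 : score ≤ 83) :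
    kpi_percent score = kpi_percent_alt score := by
  have hA : kpi_percent score = (70 : Int) := by
    simp only [kpi_percent, kpiRanges, kpiLoop,
      show ¬ (95 : Int) ≤ score by omega,
      show ¬ (89 : Int) ≤ score by omega,
      show ¬ (84 : Int) ≤ score by omega,
      show (78 : Int) ≤ score by omega,
      show score ≤ 83 by omega,
      false_and, and_true, if_false, if_true]
  have hB : kpi_percent_alt score = (70 : Int) := by
    rw [kpi_percent_alt, if_neg (by omega : ¬ (score < 42 ∨ 100 < score))]
    simp only [bisectRight, kpiThresholds, kpiPercents, List.takeWhile_cons, List.takeWhile_nil,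
      show (42 : Int) ≤ score by omega,
      show (48 : Int) ≤ score by omega,
      show (54 : Int) ≤ score by omega,
      show (60 : Int) ≤ score by omega,
      show (66 : Int) ≤ score by omega,
      show (72 : Int) ≤ score by omega,
      show (78 : Int) ≤ score by omega,
      show ¬ (84 : Int) ≤ score by omega,
      decide_true, decide_false, Bool.false_eq_true, if_true, if_false]
    rfl
  rw [hA, hB]

lemma kpiBoth_84 (score : Int) (h1 : (84 : Int) ≤ score) (h2 : score ≤ 88) :
    kpi_percent score = kpi_percent_alt score := by
  have hA : kpi_percent score = (80 : Int) := by
    simp only [kpi_percent, kpiRanges, kpiLoop,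
      show ¬ (95 : Int) ≤ score by omega,
      show ¬ (89 : Int) ≤ score by omega,
      show (84 : Int) ≤ score by omega,
      show score ≤ 88 by omega,
      false_and, and_true, if_false, if_true]
  have hB : kpi_percent_alt score = (80 : Int) := by
    rw [kpi_percent_alt, if_neg (by omega : ¬ (score < 42 ∨ 100 < score))]
    simp only [bisectRight, kpiThresholds, kpiPercents, List.takeWhile_cons, List.takeWhile_nil,
      show (42 : Int) ≤ score by omega,
      show (48 : Int) ≤ score by omega,
      show (54 : Int) ≤ score by omega,
      show (60 : Int) ≤ score by omega,
      show (66 : Int) ≤ score by omega,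
      show (72 : Int) ≤ score by omega,
      show (78 : Int) ≤ score by omega,
      show (84 : Int) ≤ score by omega,
      show ¬ (89 : Int) ≤ score by omega,
      decide_true, decide_false, Bool.false_eq_true, if_true, if_false]
    rfl
  rw [hA, hB]

lemma kpiBoth_89 (score : Int) (h1 : (89 : Int) ≤ score) (h2 : score ≤ 94) :
    kpi_percent score = kpi_percent_alt score := by
  have hA : kpi_percent score = (90 : Int) := by
    simp only [kpi_percent, kpiRanges, kpiLoop,
      show ¬ (95 : Int) ≤ score by omega,
      show (89 : Int) ≤ score by omega,
      show score ≤ 94 by omega,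
      false_and, and_true, if_false, if_true]
  have hB : kpi_percent_alt score = (90 : Int) := by
    rw [kpi_percent_alt, if_neg (by omega : ¬ (score < 42 ∨ 100 < score))]
    simp only [bisectRight, kpiThresholds, kpiPercents, List.takeWhile_cons, List.takeWhile_nil,
      show (42 : Int) ≤ score by omega,
      show (48 : Int) ≤ score by omega,
      show (54 : Int) ≤ score by omega,
      show (60 : Int) ≤ score by omega,
      show (66 : Int) ≤ score by omega,
      show (72 : Int) ≤ score by omega,
      show (78 : Int) ≤ score by omega,
      show (84 : Int) ≤ score by omega,
      show (89 : Int) ≤ score by omega,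
      show ¬ (95 : Int) ≤ score by omega,
      decide_true, decide_false, Bool.false_eq_true, if_true, if_false]
    rfl
  rw [hA, hB]

lemma kpiBoth_95 (score : Int) (h1 : (95 : Int) ≤ score) (h2 : score ≤ 100) :
    kpi_percent score = kpi_percent_alt score := by
  have hA : kpi_percent score = (100 : Int) := by
    simp only [kpi_percent, kpiRanges, kpiLoop,
      show (95 : Int) ≤ score by omega,
      show score ≤ 100 by omega,
      and_true, if_true]
  have hB : kpi_percent_alt score = (100 : Int) := by
    rw [kpi_percent_alt, if_neg (by omega : ¬ (score < 42 ∨ 100 < score))]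
    simp only [bisectRight, kpiThresholds, kpiPercents, List.takeWhile_cons, List.takeWhile_nil,
      show (42 : Int) ≤ score by omega,
      show (48 : Int) ≤ score by omega,
      show (54 : Int) ≤ score by omega,
      show (60 : Int) ≤ score by omega,
      show (66 : Int) ≤ score by omega,
      show (72 : Int) ≤ score by omega,
      show (78 : Int) ≤ score by omega,
      show (84 : Int) ≤ score by omega,
      show (89 : Int) ≤ score by omega,
      show (95 : Int) ≤ score by omega,
      decide_true, if_true]
    rfl
  rw [hA, hB]

-- ===== VERDICT (by name: the statement is the Claim_ definition above) =====
theorem kpi_percent_spec : Claim_equal_kpi_percent := by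
  intro score _
  unfold Spec_kpi_percent
  by_cases h0 : score ≤ 41
  · exact kpiBoth_low score h0
  by_cases hH : 101 ≤ score
  · exact kpiBoth_high score hH
  by_cases h42 : score ≤ 47
  · exact kpiBoth_42 score (by omega) h42
  by_cases h48 : score ≤ 53
  · exact kpiBoth_48 score (by omega) h48
  by_cases h54 : score ≤ 59
  · exact kpiBoth_54 score (by omega) h54
  by_cases h60 : score ≤ 65
  · exact kpiBoth_60 score (by omega) h60
  by_cases h66 : score ≤ 71
  · exact kpiBoth_66 score (by omega) h66
  by_cases h72 : score ≤ 77
  · exact kpiBoth_72 score (by omega) h72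
  by_cases h78 : score ≤ 83
  · exact kpiBoth_78 score (by omega) h78
  by_cases h84 : score ≤ 88
  · exact kpiBoth_84 score (by omega) h84
  by_cases h89 : score ≤ 94
  · exact kpiBoth_89 score (by omega) h89
  exact kpiBoth_95 score (by omega) (by omega)
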